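-- pv_equiv track=rewrite | github.com/rcdohm/4320-Final | app.py | generate_reservation_code
-- ===== SOURCE A (Python) =====
-- def generate_reservation_code(s):
--     t="INFOTC4320"
--     i = j = 0
--     result = ""
--     while i < len(s) and j < len(t):
--         result += s[i] + t[j]
--         i+=1
--         j+=1
--     while i < len(s):
--         result += s[i]
--         i += 1
--     while j < len(t):
--         result += t[j]
--         j += 1
--     return result
-- ===== SOURCE B (Python) =====
-- def generate_reservation_code(s):
--     t = "INFOTC4320"
--     m = min(len(s), len(t))
--     longer = s if len(s) > len(t) else t
--     def pick(k):
--         # output slot k: alternating region (k < 2m) draws from s/t by parity,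
--         # tail region draws from the longer string at offset k - m
--         if k < 2 * m:
--             return (s if k % 2 == 0 else t)[k // 2]
--         return longer[k - m]
--     return ''.join(map(pick, range(len(s) + len(t))))
-- ===== Notes on version B (the rewrite author's own statement) =====
-- stated objective: faster
-- what changed: Replaces the three sequential while loops that merge s and t with index pointers and quadratic string += by positional indexing: one pass over output positions k in range(len(s)+len(t)), computing each output character with a closed-form rule (parity/k//2 in the alternating region, offset k-m into the longer string in the tail) joined into the result.
import Mathlib
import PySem

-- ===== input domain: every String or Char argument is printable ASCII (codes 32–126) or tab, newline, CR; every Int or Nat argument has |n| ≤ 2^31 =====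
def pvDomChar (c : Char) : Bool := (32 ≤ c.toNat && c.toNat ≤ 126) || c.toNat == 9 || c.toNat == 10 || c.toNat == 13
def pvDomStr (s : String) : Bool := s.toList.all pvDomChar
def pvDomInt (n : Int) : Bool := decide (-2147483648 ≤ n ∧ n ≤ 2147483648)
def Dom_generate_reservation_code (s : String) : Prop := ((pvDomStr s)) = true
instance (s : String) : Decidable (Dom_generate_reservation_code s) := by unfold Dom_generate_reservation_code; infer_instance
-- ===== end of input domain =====

-- B replaces A's sequential three-while merge by positional indexing: one pass over the
-- output positions, each character chosen by a closed-form index rule (idiomatic/alternative).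

-- ===== PORT A =====
-- first while loop: advance through s and t together, appending s[i]+t[j]; returns the
-- accumulated result and the unconsumed tails of s and t (the values of i/j at exit).
def pvCommonA : List Char → List Char → String → String × List Char × List Char
  | a :: s', b :: t', r => pvCommonA s' t' ((r.push a).push b)
  | s', t', r => (r, s', t')

def generate_reservation_code (s : String) : String :=
  let t := "INFOTC4320"
  let p := pvCommonA s.toList t.toList ""
  -- second while loop: result += s[i] until end of s
  let r2 := p.2.1.foldl String.push p.1
  -- third while loop: result += t[j] until end of t
  p.2.2.foldl String.push r2

-- ===== PORT B =====
-- pick(k): output slot k; alternating region (k < 2m) draws from s/t by parity, the tail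
-- draws from the longer string at offset k - m.  All indices are in range, so Python's
-- s[...] is exactly getD (the default is never used).
def pvPickB (sl tl : List Char) (k : Nat) : Char :=
  let m := min sl.length tl.length
  if k < 2 * m then (if k % 2 == 0 then sl else tl).getD (k / 2) ' '
  else (if sl.length > tl.length then sl else tl).getD (k - m) ' '

def generate_reservation_code_alt (s : String) : String :=
  let t := "INFOTC4320"
  String.ofList ((List.range (s.toList.length + t.toList.length)).map
    (pvPickB s.toList t.toList))

-- ===== PRECONDITION & SPEC =====
def Spec_generate_reservation_code (s : String) (out : String) : Prop := out = generate_reservation_code_alt s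
instance (s : String) (out : String) : Decidable (Spec_generate_reservation_code s out) := by unfold Spec_generate_reservation_code; infer_instance

-- ===== CLAIM (what is proved, stated in full; the proofs are below) =====
def Claim_equal_generate_reservation_code : Prop := ∀ (s : String), Dom_generate_reservation_code s → Spec_generate_reservation_code s (generate_reservation_code s)

-- ===== LEMMAS AND PROOFS =====

-- the common "interleave then leftovers" normal form both ports are reduced to
def pvInterleave (sl tl : List Char) : List Char :=
  ((sl.zip tl).flatMap fun p => [p.1, p.2]) ++ sl.drop tl.length ++ tl.drop sl.length

theorem foldl_push_eq (l : List Char) (r : String) :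
    l.foldl String.push r = r ++ String.ofList l := by
  induction l generalizing r with
  | nil => apply String.toList_inj.mp; simp
  | cons a l ih =>
      apply String.toList_inj.mp
      simp [List.foldl, ih, String.toList_push]

theorem pvCommonA_eq (sl tl : List Char) (r : String) :
    pvCommonA sl tl r =
      (r ++ String.ofList ((sl.zip tl).flatMap fun p => [p.1, p.2]),
       sl.drop tl.length, tl.drop sl.length) := by
  induction sl generalizing tl r with
  | nil =>
      cases tl <;> exact Prod.ext (String.toList_inj.mp (by simp [pvCommonA])) rfl
  | cons a s' ih =>
      cases tl with
      | nil => exact Prod.ext (String.toList_inj.mp (by simp [pvCommonA])) rfl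
      | cons b t' =>
          refine Prod.ext (String.toList_inj.mp ?_) ?_ <;>
            simp [pvCommonA, ih, String.toList_push]

theorem map_getD_range (l : List Char) :
    (List.range l.length).map (fun k => l.getD k ' ') = l := by
  induction l with
  | nil => simp
  | cons a l ih =>
      simp [List.range_succ_eq_map, List.map_map, Function.comp_def]
      exact ih

theorem pvPickB_shift (a b : Char) (sl tl : List Char) (k : Nat) :
    pvPickB (a :: sl) (b :: tl) (k + 2) = pvPickB sl tl k := by
  unfold pvPickB
  simp only [List.length_cons]
  by_cases h : k < 2 * min sl.length tl.length
  · have h' : k + 2 < 2 * min (sl.length + 1) (tl.length + 1) := by omega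
    simp only [if_pos h, if_pos h']
    have hm : (k + 2) % 2 = k % 2 := by omega
    have hd : (k + 2) / 2 = k / 2 + 1 := by omega
    rw [hm, hd]
    by_cases he : k % 2 = 0 <;> simp [he]
  · have h' : ¬ (k + 2 < 2 * min (sl.length + 1) (tl.length + 1)) := by omega
    simp only [if_neg h, if_neg h']
    have hk : k + 2 - min (sl.length + 1) (tl.length + 1)
        = (k - min sl.length tl.length) + 1 := by omega
    rw [hk]
    by_cases hg : sl.length > tl.length
    · have hg' : sl.length + 1 > tl.length + 1 := by omega
      simp [hg, hg']
    · have hg' : ¬ (sl.length + 1 > tl.length + 1) := by omega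
      simp [hg, hg']

theorem pickB_main (sl tl : List Char) :
    (List.range (sl.length + tl.length)).map (pvPickB sl tl) = pvInterleave sl tl := by
  induction sl generalizing tl with
  | nil =>
      have : ∀ k, pvPickB [] tl k = tl.getD k ' ' := by
        intro k; unfold pvPickB; simp
      simp only [List.length_nil, Nat.zero_add]
      rw [List.map_congr_left (fun k _ => this k), map_getD_range]
      simp [pvInterleave]
  | cons a sl ih =>
      cases tl with
      | nil =>
          have : ∀ k, pvPickB (a :: sl) [] k = (a :: sl).getD k ' ' := by
            intro k; unfold pvPickB; simp
          rw [List.map_congr_left (fun k _ => this k)]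
          simp only [List.length_nil, Nat.add_zero]
          rw [map_getD_range]
          simp [pvInterleave]
      | cons b tl =>
          have hlen : (a :: sl).length + (b :: tl).length
              = (sl.length + tl.length) + 1 + 1 := by simp; omega
          rw [hlen, List.range_succ_eq_map, List.range_succ_eq_map]
          simp only [List.map_cons, List.map_map, Function.comp_def]
          have h0 : pvPickB (a :: sl) (b :: tl) 0 = a := by
            unfold pvPickB; simp
          have h1 : pvPickB (a :: sl) (b :: tl) 1 = b := by
            unfold pvPickB; simp
            omega
          have hshift : ∀ k, pvPickB (a :: sl) (b :: tl) (k + 1 + 1)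
              = pvPickB sl tl k := fun k => pvPickB_shift a b sl tl k
          rw [h0, h1, List.map_congr_left (fun k _ => hshift k), ih]
          simp [pvInterleave]

-- ===== VERDICT (by name: the statement is the Claim_ definition above) =====
theorem generate_reservation_code_spec : Claim_equal_generate_reservation_code := by
  intro s _
  show _ = _
  simp only [generate_reservation_code, generate_reservation_code_alt,
    pvCommonA_eq, foldl_push_eq, pickB_main]
  apply String.toList_inj.mp
  simp [pvInterleave]
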